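-- pv_equiv track=rewrite | github.com/michaldzirba/python_bootcamp | bootcamp-home-2.py | findextreems
-- ===== SOURCE A (Python) =====
-- def amp(a):
--     return abs(a[2]-a[1])
--
-- def findextreems(list):
--     minamp = None
--     maxamp = None
--
--     for d in list:
--         amp_d = amp(d)
--         if(minamp == None or amp(minamp) > amp_d):
--             minamp = d
--         if(maxamp == None or amp(maxamp) < amp_d):
--             maxamp = d
--
--     return (minamp, maxamp)
-- ===== SOURCE B (Python) =====
-- def amp(a):
--     return abs(a[2]-a[1])
--
-- def findextreems(list):
--     if not list:
--         return (None, None)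
--     asc = sorted(list, key=amp)
--     desc = sorted(list, key=amp, reverse=True)
--     return (asc[0], desc[0])
-- ===== Notes on version B (the rewrite author's own statement) =====
-- stated objective: alternative
-- what changed: Replaces the single min/max-tracking loop with sort-then-pick: two stable sorts keyed on amplitude (ascending and descending) whose heads are the first minimal and first maximal elements.
import Mathlib
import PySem

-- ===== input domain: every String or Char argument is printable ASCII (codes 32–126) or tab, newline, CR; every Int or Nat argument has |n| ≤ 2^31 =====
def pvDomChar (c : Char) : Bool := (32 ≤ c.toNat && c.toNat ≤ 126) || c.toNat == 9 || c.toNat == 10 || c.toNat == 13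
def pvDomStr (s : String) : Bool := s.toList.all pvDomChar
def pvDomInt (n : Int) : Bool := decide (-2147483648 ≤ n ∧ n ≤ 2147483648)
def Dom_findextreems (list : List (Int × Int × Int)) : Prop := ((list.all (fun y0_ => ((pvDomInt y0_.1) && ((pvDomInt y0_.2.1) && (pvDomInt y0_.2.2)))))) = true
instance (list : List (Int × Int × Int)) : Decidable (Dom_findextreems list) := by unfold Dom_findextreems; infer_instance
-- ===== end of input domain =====

-- B replaces A's single min/max-tracking loop with sort-then-pick: two stable sorts keyed on
-- amplitude (ascending and descending) whose heads are the first minimal/maximal elements (alternative algorithm).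


-- ===== PORT A =====
-- amp(a) = abs(a[2]-a[1])
def ampA (a : Int × Int × Int) : Int := |a.2.2 - a.2.1|

def findextreems (list : List (Int × Int × Int)) : (Option (Int × Int × Int)) × (Option (Int × Int × Int)) :=
  list.foldl
    (fun st d =>
      let amp_d := ampA d
      let minamp := match st.1 with
        | none => some d
        | some m => if ampA m > amp_d then some d else some m
      let maxamp := match st.2 with
        | none => some d
        | some m => if ampA m < amp_d then some d else some m
      (minamp, maxamp))
    (none, none)

-- ===== PORT B =====
def ampB (a : Int × Int × Int) : Int := |a.2.2 - a.2.1|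

def findextreems_alt (list : List (Int × Int × Int)) : (Option (Int × Int × Int)) × (Option (Int × Int × Int)) :=
  if list = [] then (none, none)
  else
    -- asc[0] / desc[0]: the lists are nonempty here, so Python's [0] is head?
    ((PySem.List.sorted list ampB).head?, (PySem.List.sorted list ampB true).head?)

-- ===== PRECONDITION & SPEC =====
def Spec_findextreems (list : List (Int × Int × Int)) (out : (Option (Int × Int × Int)) × (Option (Int × Int × Int))) : Prop := out = findextreems_alt list
instance (list : List (Int × Int × Int)) (out : (Option (Int × Int × Int)) × (Option (Int × Int × Int))) : Decidable (Spec_findextreems list out) := by unfold Spec_findextreems; infer_instance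

-- ===== CLAIM =====
def Claim_equal_findextreems : Prop := ∀ (list : List (Int × Int × Int)), Dom_findextreems list → Spec_findextreems list (findextreems list)

-- ===== LEMMAS AND PROOFS =====

-- A's combined fold over a pair state splits into two separate single-extremum folds.
theorem findextreems_fold_split (xs : List (Int × Int × Int))
    (mn mx : Option (Int × Int × Int)) :
    xs.foldl
      (fun st d =>
        let amp_d := ampA d
        let minamp := match st.1 with
          | none => some d
          | some m => if ampA m > amp_d then some d else some m
        let maxamp := match st.2 with
          | none => some d
          | some m => if ampA m < amp_d then some d else some m
        (minamp, maxamp))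
      (mn, mx)
    = (xs.foldl
        (fun acc x => match acc with
          | none => some x
          | some m => if ampB x < ampB m then some x else some m) mn,
       xs.foldl
        (fun acc x => match acc with
          | none => some x
          | some m => if ampB m < ampB x then some x else some m) mx) := by
  induction xs generalizing mn mx with
  | nil => rfl
  | cons d t ih =>
    simp only [List.foldl_cons]
    rw [ih]
    rfl

-- one insertion step, seen through head?
theorem head?_insertBy {α : Type} (p : α → α → Bool) (x : α) (acc : List α) :
    (PySem.List.insertBy p x acc).head? =
      match acc.head? with
      | none => some x
      | some m => if p x m then some x else some m := by
  cases acc with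
  | nil => rfl
  | cons y ys =>
    simp only [PySem.List.insertBy, List.head?_cons]
    split <;> rfl

-- the first-minimum fold equals the head of the stable insertion fold
theorem min_fold_eq_head (xs : List (Int × Int × Int)) (acc : List (Int × Int × Int)) :
    xs.foldl
      (fun st x => match st with
        | none => some x
        | some m => if ampB x < ampB m then some x else some m) acc.head?
    = (xs.foldl (fun a x => PySem.List.insertBy (fun a b => decide (ampB a < ampB b)) x a) acc).head? := by
  induction xs generalizing acc with
  | nil => rfl
  | cons d t ih =>
    simp only [List.foldl_cons]
    rw [← ih (PySem.List.insertBy (fun a b => decide (ampB a < ampB b)) d acc),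
        head?_insertBy]
    cases acc with
    | nil => rfl
    | cons y ys =>
      simp only [List.head?_cons]
      by_cases h : ampB d < ampB y <;> simp [h]

-- the first-maximum fold equals the head of the reverse stable insertion fold
theorem max_fold_eq_head (xs : List (Int × Int × Int)) (acc : List (Int × Int × Int)) :
    xs.foldl
      (fun st x => match st with
        | none => some x
        | some m => if ampB m < ampB x then some x else some m) acc.head?
    = (xs.foldl (fun a x => PySem.List.insertBy (fun a b => decide (ampB b < ampB a)) x a) acc).head? := by
  induction xs generalizing acc with
  | nil => rfl
  | cons d t ih =>
    simp only [List.foldl_cons]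
    rw [← ih (PySem.List.insertBy (fun a b => decide (ampB b < ampB a)) d acc),
        head?_insertBy]
    cases acc with
    | nil => rfl
    | cons y ys =>
      simp only [List.head?_cons]
      by_cases h : ampB y < ampB d <;> simp [h]

-- ===== VERDICT =====
theorem findextreems_spec : Claim_equal_findextreems := by
  unfold Claim_equal_findextreems
  intro list _
  unfold Spec_findextreems findextreems findextreems_alt
  rw [findextreems_fold_split]
  cases list with
  | nil => rfl
  | cons d t =>
    have hmin := min_fold_eq_head (d :: t) []
    have hmax := max_fold_eq_head (d :: t) []
    simp only [List.head?_nil] at hmin hmax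
    rw [PySem.List.sorted_eq_foldl_insertBy, PySem.List.sorted_rev_eq_foldl_insertBy]
    simp only [reduceCtorEq, if_false, hmin, hmax]
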